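-- pv_equiv track=rewrite | github.com/sjwhole/baekjoon_py | 1018_c1.py | get_column_length
-- ===== SOURCE A (Python) =====
-- def get_column_length(ls):
--     min_info = []
--     max_info = []
--     for i in range(len(ls)):
--         if len(ls[i]) != 0:
--             min_info.append(min(ls[i]))
--             max_info.append(max(ls[i]))
--     column_length = max(max_info) - min(min_info)
--     return column_length
-- ===== SOURCE B (Python) =====
-- def get_column_length(ls):
--     flat = [x for row in ls for x in row]
--     return max(flat) - min(flat)
-- ===== Notes on version B (the rewrite author's own statement) =====
-- stated objective: simpler
-- what changed: Flattens all sublists into one list and takes max(flat)-min(flat), replacing the per-row min/max accumulator lists, the index loop and the empty-row guard with a single-level pass.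
-- outside the precondition, e.g. on get_column_length([]): A raises ValueError, B raises ValueError; on get_column_length([[], []]): A raises ValueError, B raises ValueError
import Mathlib
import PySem

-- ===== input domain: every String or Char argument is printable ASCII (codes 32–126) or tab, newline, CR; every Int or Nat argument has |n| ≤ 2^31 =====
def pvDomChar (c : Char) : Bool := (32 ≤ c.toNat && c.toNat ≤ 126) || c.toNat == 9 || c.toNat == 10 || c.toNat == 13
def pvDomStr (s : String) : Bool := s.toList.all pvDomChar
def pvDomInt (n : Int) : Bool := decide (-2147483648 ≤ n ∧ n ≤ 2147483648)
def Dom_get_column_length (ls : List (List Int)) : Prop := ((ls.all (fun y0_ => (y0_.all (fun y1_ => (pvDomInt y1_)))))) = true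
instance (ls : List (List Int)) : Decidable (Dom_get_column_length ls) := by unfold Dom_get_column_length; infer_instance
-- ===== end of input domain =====

-- B flattens all sublists into one list and returns max(flat) - min(flat), replacing A's
-- per-row min/max accumulator lists, index loop and empty-row guard (objective: simpler).


-- ===== PORT A =====
def get_column_length (ls : List (List Int)) : Int :=
  let st := (PySem.List.pyRange 0 (PySem.List.len ls) 1).foldl
    (fun (acc : List Int × List Int) i =>
      if (PySem.List.pyGetD ls i []).length ≠ 0 then
        (acc.1 ++ [(PySem.List.min? (PySem.List.pyGetD ls i []) (fun y => y)).getD 0],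
         acc.2 ++ [(PySem.List.max? (PySem.List.pyGetD ls i []) (fun y => y)).getD 0])
      else acc) ([], [])
  match PySem.List.max? st.2 (fun y => y), PySem.List.min? st.1 (fun y => y) with
  | some mx, some mn => mx - mn
  | _, _ => 0   -- unreachable under Pre_: Python raises ValueError here

-- ===== PORT B =====
def get_column_length_alt (ls : List (List Int)) : Int :=
  let flat := ls.flatMap (fun row => row)
  (PySem.List.max? flat (fun y => y)).getD 0 - (PySem.List.min? flat (fun y => y)).getD 0
  -- getD's default 0 is only reached where Python's max([])/min([]) raise ValueError (outside Pre_)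

-- ===== PRECONDITION & SPEC =====
-- Pre_ excludes exactly the inputs where every sublist is empty (incl. ls = []),
-- on which A's max([]) raises ValueError (and B's max([]) raises the same).
def Pre_get_column_length (ls : List (List Int)) : Prop := ∃ row ∈ ls, row ≠ []
instance (ls : List (List Int)) : Decidable (Pre_get_column_length ls) := by unfold Pre_get_column_length; infer_instance
def pvWitness_get_column_length : List (List Int) := [[3, 1], [], [7]]

def Spec_get_column_length (ls : List (List Int)) (out : Int) : Prop := out = get_column_length_alt ls
instance (ls : List (List Int)) (out : Int) : Decidable (Spec_get_column_length ls out) := by unfold Spec_get_column_length; infer_instance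

-- ===== CLAIM (what is proved, stated in full; the proofs are below) =====
def Claim_equal_get_column_length : Prop := ∀ (ls : List (List Int)), Dom_get_column_length ls → Pre_get_column_length ls → Spec_get_column_length ls (get_column_length ls)

-- ===== LEMMAS AND PROOFS =====

-- value-level characterisation of Python max()/min() on Int lists (ties collapse at value level)
theorem max?_id_eq_some_of (xs : List Int) (m : Int) (hm : m ∈ xs)
    (hmax : ∀ x ∈ xs, x ≤ m) : PySem.List.max? xs (fun y => y) = some m := by
  cases h : PySem.List.max? xs (fun y => y) with
  | none =>
    rw [PySem.List.max?_eq_none_iff] at h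
    simp [h] at hm
  | some v =>
    have hv := PySem.List.max?_mem h
    have h1 := PySem.List.max?_isMax h m hm
    have h2 := hmax v hv
    simp only [Option.some.injEq]
    omega

theorem min?_id_eq_some_of (xs : List Int) (m : Int) (hm : m ∈ xs)
    (hmin : ∀ x ∈ xs, m ≤ x) : PySem.List.min? xs (fun y => y) = some m := by
  cases h : PySem.List.min? xs (fun y => y) with
  | none =>
    rw [PySem.List.min?_eq_none_iff] at h
    simp [h] at hm
  | some v =>
    have hv := PySem.List.min?_mem h
    have h1 := PySem.List.min?_isMin h m hm
    have h2 := hmin v hv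
    simp only [Option.some.injEq]
    omega

-- on a nonempty row, Python max(row)/min(row) return a member bounding the row
theorem row_max (row : List Int) (hne : row ≠ []) :
    PySem.List.max? row (fun y => y) = some ((PySem.List.max? row (fun y => y)).getD 0) ∧
    (PySem.List.max? row (fun y => y)).getD 0 ∈ row ∧
    ∀ x ∈ row, x ≤ (PySem.List.max? row (fun y => y)).getD 0 := by
  cases h : PySem.List.max? row (fun y => y) with
  | none => rw [PySem.List.max?_eq_none_iff] at h; exact absurd h hne
  | some v => exact ⟨rfl, PySem.List.max?_mem h, PySem.List.max?_isMax h⟩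

theorem row_min (row : List Int) (hne : row ≠ []) :
    PySem.List.min? row (fun y => y) = some ((PySem.List.min? row (fun y => y)).getD 0) ∧
    (PySem.List.min? row (fun y => y)).getD 0 ∈ row ∧
    ∀ x ∈ row, (PySem.List.min? row (fun y => y)).getD 0 ≤ x := by
  cases h : PySem.List.min? row (fun y => y) with
  | none => rw [PySem.List.min?_eq_none_iff] at h; exact absurd h hne
  | some v => exact ⟨rfl, PySem.List.min?_mem h, PySem.List.min?_isMin h⟩

-- A's index loop over range(len(ls)) builds exactly the two per-row lists
theorem get_column_length_fold_eq (ls : List (List Int)) :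
    (PySem.List.pyRange 0 (PySem.List.len ls) 1).foldl
      (fun (acc : List Int × List Int) i =>
        if (PySem.List.pyGetD ls i []).length ≠ 0 then
          (acc.1 ++ [(PySem.List.min? (PySem.List.pyGetD ls i []) (fun y => y)).getD 0],
           acc.2 ++ [(PySem.List.max? (PySem.List.pyGetD ls i []) (fun y => y)).getD 0])
        else acc) ([], [])
    = ((ls.filter (fun row => decide (row.length ≠ 0))).map
         (fun row => (PySem.List.min? row (fun y => y)).getD 0),
       (ls.filter (fun row => decide (row.length ≠ 0))).map
         (fun row => (PySem.List.max? row (fun y => y)).getD 0)) := by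
  have h1 := List.foldl_map (f := fun j => PySem.List.pyGetD ls j ([] : List Int))
    (g := fun (acc : List Int × List Int) row =>
      if row.length ≠ 0 then
        (acc.1 ++ [(PySem.List.min? row (fun y => y)).getD 0],
         acc.2 ++ [(PySem.List.max? row (fun y => y)).getD 0])
      else acc)
    (l := PySem.List.pyRange 0 (PySem.List.len ls) 1) (init := (([] : List Int), ([] : List Int)))
  rw [show PySem.List.pyRange 0 (PySem.List.len ls) 1 = PySem.List.pyRange 0 (PySem.List.len ls) from rfl,
      PySem.List.map_pyGetD_pyRange_zero] at h1
  rw [← h1]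
  rw [PySem.List.foldl_congr_mem ls _
    (fun (s : List Int × List Int) row =>
      ((fun (a : List Int) (r : List Int) =>
          if r.length ≠ 0 then a ++ [(PySem.List.min? r (fun y => y)).getD 0] else a) s.1 row,
       (fun (a : List Int) (r : List Int) =>
          if r.length ≠ 0 then a ++ [(PySem.List.max? r (fun y => y)).getD 0] else a) s.2 row))
    ([], [])
    (by intro acc x _; by_cases h : x.length ≠ 0 <;> simp [h])]
  rw [PySem.List.foldl_prod_mk
    (f := fun (a : List Int) (r : List Int) =>
      if r.length ≠ 0 then a ++ [(PySem.List.min? r (fun y => y)).getD 0] else a)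
    (g := fun (a : List Int) (r : List Int) =>
      if r.length ≠ 0 then a ++ [(PySem.List.max? r (fun y => y)).getD 0] else a)]
  rw [PySem.List.foldl_append_ite (p := fun (r : List Int) => r.length ≠ 0),
      PySem.List.foldl_append_ite (p := fun (r : List Int) => r.length ≠ 0)]
  simp

-- ===== VERDICT (by name: the statement is the Claim_ definition above) =====
theorem get_column_length_spec : Claim_equal_get_column_length := by
  intro ls _ hpre
  obtain ⟨r, hrls, hrne⟩ := hpre
  show get_column_length ls = get_column_length_alt ls
  simp only [get_column_length, get_column_length_alt, get_column_length_fold_eq]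
  set rows := ls.filter (fun row => decide (row.length ≠ 0)) with hrows
  set flat := ls.flatMap (fun row => row) with hflat
  have hmem_rows : ∀ row, row ∈ rows ↔ row ∈ ls ∧ row ≠ [] := by
    intro row
    simp [hrows, List.mem_filter, List.length_eq_zero_iff]
  have hr_rows : r ∈ rows := (hmem_rows r).2 ⟨hrls, hrne⟩
  -- the A-side max list is nonempty; name its Python max M
  cases hM : PySem.List.max? (rows.map (fun row => (PySem.List.max? row (fun y => y)).getD 0))
      (fun y => y) with
  | none =>
    rw [PySem.List.max?_eq_none_iff, List.map_eq_nil_iff] at hM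
    rw [hM] at hr_rows
    exact absurd hr_rows (List.not_mem_nil)
  | some M =>
  cases hm : PySem.List.min? (rows.map (fun row => (PySem.List.min? row (fun y => y)).getD 0))
      (fun y => y) with
  | none =>
    rw [PySem.List.min?_eq_none_iff, List.map_eq_nil_iff] at hm
    rw [hm] at hr_rows
    exact absurd hr_rows (List.not_mem_nil)
  | some m =>
  -- B's max over flat equals M
  have hMflat : PySem.List.max? flat (fun y => y) = some M := by
    apply max?_id_eq_some_of
    · obtain ⟨row0, hrow0, hMval⟩ := List.mem_map.1 (PySem.List.max?_mem hM)
      obtain ⟨hrow0ls, hrow0ne⟩ := (hmem_rows row0).1 hrow0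
      exact List.mem_flatMap.2 ⟨row0, hrow0ls, hMval ▸ (row_max row0 hrow0ne).2.1⟩
    · intro x hx
      obtain ⟨row1, hrow1ls, hxrow1⟩ := List.mem_flatMap.1 hx
      have hrow1ne : row1 ≠ [] := by rintro rfl; exact absurd hxrow1 (List.not_mem_nil)
      calc x ≤ (PySem.List.max? row1 (fun y => y)).getD 0 := (row_max row1 hrow1ne).2.2 x hxrow1
        _ ≤ M := PySem.List.max?_isMax hM _
              (List.mem_map.2 ⟨row1, (hmem_rows row1).2 ⟨hrow1ls, hrow1ne⟩, rfl⟩)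
  -- B's min over flat equals m
  have hmflat : PySem.List.min? flat (fun y => y) = some m := by
    apply min?_id_eq_some_of
    · obtain ⟨row0, hrow0, hmval⟩ := List.mem_map.1 (PySem.List.min?_mem hm)
      obtain ⟨hrow0ls, hrow0ne⟩ := (hmem_rows row0).1 hrow0
      exact List.mem_flatMap.2 ⟨row0, hrow0ls, hmval ▸ (row_min row0 hrow0ne).2.1⟩
    · intro x hx
      obtain ⟨row1, hrow1ls, hxrow1⟩ := List.mem_flatMap.1 hx
      have hrow1ne : row1 ≠ [] := by rintro rfl; exact absurd hxrow1 (List.not_mem_nil)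
      calc m ≤ (PySem.List.min? row1 (fun y => y)).getD 0 := PySem.List.min?_isMin hm _
              (List.mem_map.2 ⟨row1, (hmem_rows row1).2 ⟨hrow1ls, hrow1ne⟩, rfl⟩)
        _ ≤ x := (row_min row1 hrow1ne).2.2 x hxrow1
  rw [hMflat, hmflat]
  rfl
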